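-- pv_equiv track=rewrite | github.com/csssu/codedone3 | Week5/problemA.py | find_farey_sequence
-- ===== SOURCE A (Python) =====
-- def gcd(a, b):
--     if b == 0:
--         return a
--     return gcd(b, a % b)
--
-- def find_farey_sequence(n, k):
--     x1, y1, x2, y2 = 0, 1, 1, n
--     while k != 1:
--         m = (n + y1) // y2
--         x3 = m * x2 - x1
--         y3 = m * y2 - y1
--         x1, y1, x2, y2 = x2, y2, x3, y3
--         k -= 1
--
--     numerator = x2
--     denominator = y2
--     gcd_value = gcd(numerator, denominator)
--     numerator //= gcd_value
--     denominator //= gcd_value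
--
--     return numerator, denominator
-- ===== SOURCE B (Python) =====
-- def _inv_mod(a, m):
--     # modular inverse of a mod m via iterative extended Euclid (0 <= result < m)
--     r0, r1 = a % m, m
--     s0, s1 = 1, 0
--     while r1 != 0:
--         qu = r0 // r1
--         r0, r1 = r1, r0 - qu * r1
--         s0, s1 = s1, s0 - qu * s1
--     return s0 % m
--
--
-- def find_farey_sequence(n, k):
--     # carry only the current term p/q; the successor denominator is the unique
--     # value in (n-q, n] congruent to -p^{-1} mod q, found by a modular inverse
--     p, q = 1, n
--     for _ in range(k - 1):
--         t = (-_inv_mod(p, q)) % q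
--         qn = n - (n - t) % q
--         p, q = (p * qn + 1) // q, qn
--     return p, q
-- ===== Notes on version B (the rewrite author's own statement) =====
-- stated objective: alternative
-- what changed: A advances the Farey sequence with the classical two-term recurrence (previous and current fraction, one floor division per step, final gcd reduction); B carries only the current fraction p/q and computes each successor directly as the unique denominator in (n-q, n] congruent to -p^{-1} mod q via an extended-Euclid modular inverse, with no trailing gcd reduction.
-- outside the precondition, e.g. on find_farey_sequence(-3, 1): A returns (-1, 3), B returns (1, -3); on find_farey_sequence(0, 2): A raises ZeroDivisionError, B raises ZeroDivisionError
import Mathlib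
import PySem

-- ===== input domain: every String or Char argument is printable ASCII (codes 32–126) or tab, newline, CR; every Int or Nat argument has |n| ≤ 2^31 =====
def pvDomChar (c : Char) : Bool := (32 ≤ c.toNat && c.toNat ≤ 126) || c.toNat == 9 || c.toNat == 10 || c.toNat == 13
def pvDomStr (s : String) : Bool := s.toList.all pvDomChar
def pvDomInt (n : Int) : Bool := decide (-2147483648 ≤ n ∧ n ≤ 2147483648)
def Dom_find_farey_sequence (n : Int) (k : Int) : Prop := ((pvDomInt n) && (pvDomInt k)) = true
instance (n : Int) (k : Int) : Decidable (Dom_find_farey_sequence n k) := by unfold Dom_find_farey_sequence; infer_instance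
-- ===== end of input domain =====

-- B replaces A's two-term Farey recurrence (carrying the previous AND current term and a
-- floor division) by a one-term recurrence: the successor denominator is the unique value in
-- (n-q, n] congruent to -p⁻¹ (mod q), found by an extended-Euclid modular inverse.
-- Equivalence of the RETURN value is proved on Pre_ (n ≥ 1, k ≥ 1), the natural Farey domain.

-- termination measure for Python's floor-mod loops (cited by the ports' decreasing_by)
theorem pvNatAbsModLt (r0 r1 : Int) (h : r1 ≠ 0) :
    (PySem.Int.mod r0 r1).natAbs < r1.natAbs := by
  rcases lt_or_gt_of_ne h with hneg | hpos
  · have := PySem.Int.mod_neg_bounds r0 hneg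
    omega
  · have h1 := PySem.Int.mod_nonneg r0 hpos
    have h2 := PySem.Int.mod_lt r0 hpos
    omega

-- ===== PORT A =====
def pygcd (a b : Int) : Int :=
  if h : b = 0 then a else pygcd b (PySem.Int.mod a b)
termination_by b.natAbs
decreasing_by exact pvNatAbsModLt a b h

def fareyLoopA (n : Int) : Nat → Int × Int × Int × Int → Int × Int × Int × Int
  | 0, s => s
  | j + 1, (x1, y1, x2, y2) =>
      let m := PySem.Int.floordiv (n + y1) y2
      fareyLoopA n j (x2, y2, m * x2 - x1, m * y2 - y1)

def find_farey_sequence (n : Int) (k : Int) : List Int :=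
  let s := fareyLoopA n (k - 1).toNat (0, 1, 1, n)
  let numerator := s.2.2.1
  let denominator := s.2.2.2
  let g := pygcd numerator denominator
  [PySem.Int.floordiv numerator g, PySem.Int.floordiv denominator g]

-- ===== PORT B =====
def invModLoop (m r0 r1 s0 s1 : Int) : Int :=
  if h : r1 = 0 then PySem.Int.mod s0 m
  else
    let qu := PySem.Int.floordiv r0 r1
    invModLoop m r1 (r0 - qu * r1) s1 (s0 - qu * s1)
termination_by r1.natAbs
decreasing_by
  have hrw : r0 - PySem.Int.floordiv r0 r1 * r1 = PySem.Int.mod r0 r1 := by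
    have := PySem.Int.floordiv_mul_add_mod r0 r1; linarith
  rw [hrw]; exact pvNatAbsModLt r0 r1 h

def inv_mod (a m : Int) : Int := invModLoop m (PySem.Int.mod a m) m 1 0

def fareyLoopB (n : Int) : Nat → Int × Int → Int × Int
  | 0, pq => pq
  | j + 1, (p, q) =>
      let t := PySem.Int.mod (-(inv_mod p q)) q
      let qn := n - PySem.Int.mod (n - t) q
      fareyLoopB n j (PySem.Int.floordiv (p * qn + 1) q, qn)

def find_farey_sequence_alt (n : Int) (k : Int) : List Int :=
  let pq := fareyLoopB n (k - 1).toNat (1, n)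
  [pq.1, pq.2]

-- ===== PRECONDITION & SPEC =====
-- Pre_ restricts to the natural Farey domain n ≥ 1, k ≥ 1: for k ≤ 0 A's while loop never
-- terminates, and for n ≤ 0 A variously raises ZeroDivisionError, diverges in gcd, or
-- sign-normalizes through a negative gcd (e.g. numerator -1, denominator 3 at n = -3, k = 1), an artefact of its
-- recursive gcd on negative input.
def Pre_find_farey_sequence (n : Int) (k : Int) : Prop := 1 ≤ n ∧ 1 ≤ k
instance (n : Int) (k : Int) : Decidable (Pre_find_farey_sequence n k) := by
  unfold Pre_find_farey_sequence; infer_instance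

def pvWitness_find_farey_sequence : Int × Int := (5, 7)

def Spec_find_farey_sequence (n : Int) (k : Int) (out : List Int) : Prop :=
  out = find_farey_sequence_alt n k
instance (n : Int) (k : Int) (out : List Int) : Decidable (Spec_find_farey_sequence n k out) := by
  unfold Spec_find_farey_sequence; infer_instance

-- ===== CLAIM (what is proved, stated in full; the proofs are below) =====
def Claim_equal_find_farey_sequence : Prop :=
  ∀ (n : Int) (k : Int), Dom_find_farey_sequence n k → Pre_find_farey_sequence n k →
    Spec_find_farey_sequence n k (find_farey_sequence n k)

-- ===== LEMMAS AND PROOFS =====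

-- loop invariant: (x1/y1, x2/y2) are consecutive Farey-recurrence terms of order n
def FInv (n x1 y1 x2 y2 : Int) : Prop :=
  x2 * y1 - x1 * y2 = 1 ∧ 1 ≤ y2 ∧ y2 ≤ n ∧ n - y2 < y1 ∧ y1 ≤ n ∧ 0 ≤ x1 ∧ 0 ≤ x2

theorem finv_coprime {n x1 y1 x2 y2 : Int} (h : FInv n x1 y1 x2 y2) :
    Int.gcd x2 y2 = 1 := by
  rw [← Int.isCoprime_iff_gcd_eq_one]
  exact ⟨y1, -x1, by linarith [h.1]⟩

theorem finv_step {n x1 y1 x2 y2 : Int} (h : FInv n x1 y1 x2 y2) :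
    FInv n x2 y2 (PySem.Int.floordiv (n + y1) y2 * x2 - x1)
      (PySem.Int.floordiv (n + y1) y2 * y2 - y1) := by
  obtain ⟨hdet, hy2, hy2n, hy1l, hy1u, hx1, hx2⟩ := h
  set m := PySem.Int.floordiv (n + y1) y2 with hm
  have hmod := PySem.Int.floordiv_mul_add_mod (n + y1) y2
  rw [← hm] at hmod
  have hr0 := PySem.Int.mod_nonneg (n + y1) (by omega : (0:Int) < y2)
  have hr1 := PySem.Int.mod_lt (n + y1) (by omega : (0:Int) < y2)
  -- y3 = n - ((n+y1) mod y2)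
  have hy3u : m * y2 - y1 ≤ n := by omega
  have hy3l : n - y2 < m * y2 - y1 := by omega
  have hdet' : (m * x2 - x1) * y2 - x2 * (m * y2 - y1) = 1 := by
    have : (m * x2 - x1) * y2 - x2 * (m * y2 - y1) = x2 * y1 - x1 * y2 := by ring
    rw [this]; exact hdet
  have hx3 : 0 ≤ m * x2 - x1 := by nlinarith
  exact ⟨hdet', by omega, hy3u, by omega, hy2n, hx2, hx3⟩

theorem mod_sub_dvd (a b : Int) : b ∣ a - PySem.Int.mod a b :=
  ⟨PySem.Int.floordiv a b, by linear_combination -PySem.Int.floordiv_mul_add_mod a b⟩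

theorem invModLoop_done (m a r0 s0 s1 : Int) (hm : 0 < m) (hr0 : 0 ≤ r0)
    (hd0 : m ∣ s0 * a - r0) (hg : Int.gcd r0 0 = 1) :
    0 ≤ invModLoop m r0 0 s0 s1 ∧ invModLoop m r0 0 s0 s1 < m ∧
      m ∣ a * invModLoop m r0 0 s0 s1 - 1 := by
  rw [invModLoop]
  simp only [dif_pos]
  refine ⟨PySem.Int.mod_nonneg s0 hm, PySem.Int.mod_lt s0 hm, ?_⟩
  have hr01 : r0 = 1 := by
    have h1 := Int.gcd_zero_right r0
    have h2 := Int.natAbs_of_nonneg hr0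
    omega
  subst hr01
  have hmd := mod_sub_dvd s0 m
  have heq : a * PySem.Int.mod s0 m - 1 =
      (s0 * a - 1) + (-a) * (s0 - PySem.Int.mod s0 m) := by ring
  rw [heq]
  exact dvd_add hd0 (Dvd.dvd.mul_left hmd (-a))

theorem invModLoop_spec : ∀ (N : Nat) (m a r0 r1 s0 s1 : Int), r1.natAbs ≤ N → 0 < m →
    0 ≤ r0 → 0 ≤ r1 → (m ∣ s0 * a - r0) → (m ∣ s1 * a - r1) → Int.gcd r0 r1 = 1 →
    0 ≤ invModLoop m r0 r1 s0 s1 ∧ invModLoop m r0 r1 s0 s1 < m ∧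
      m ∣ a * invModLoop m r0 r1 s0 s1 - 1 := by
  intro N
  induction N with
  | zero =>
    intro m a r0 r1 s0 s1 hN hm hr0 hr1 hd0 hd1 hg
    have hr1z : r1 = 0 := by omega
    subst hr1z
    exact invModLoop_done m a r0 s0 s1 hm hr0 hd0 hg
  | succ N ih =>
    intro m a r0 r1 s0 s1 hN hm hr0 hr1 hd0 hd1 hg
    by_cases h1 : r1 = 0
    · subst h1; exact invModLoop_done m a r0 s0 s1 hm hr0 hd0 hg
    · have hr1pos : (0:Int) < r1 := by omega
      rw [invModLoop]
      simp only [dif_neg h1]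
      have hmodeq : r0 - PySem.Int.floordiv r0 r1 * r1 = PySem.Int.mod r0 r1 := by
        linear_combination -PySem.Int.floordiv_mul_add_mod r0 r1
      have hm0 := PySem.Int.mod_nonneg r0 hr1pos
      have hm1 := PySem.Int.mod_lt r0 hr1pos
      refine ih m a r1 (r0 - PySem.Int.floordiv r0 r1 * r1) s1
        (s0 - PySem.Int.floordiv r0 r1 * s1) (by omega) hm hr1 (by omega) hd1 ?_ ?_
      · have heq : (s0 - PySem.Int.floordiv r0 r1 * s1) * a -
            (r0 - PySem.Int.floordiv r0 r1 * r1) =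
            (s0 * a - r0) + (-(PySem.Int.floordiv r0 r1)) * (s1 * a - r1) := by ring
        rw [heq]
        exact dvd_add hd0 (Dvd.dvd.mul_left hd1 _)
      · have heq : r0 - PySem.Int.floordiv r0 r1 * r1 =
            r0 + (-(PySem.Int.floordiv r0 r1)) * r1 := by ring
        rw [heq, Int.gcd_add_mul_right_right, Int.gcd_comm]
        exact hg

theorem inv_mod_spec {a m : Int} (hm : 0 < m) (hg : Int.gcd a m = 1) :
    0 ≤ inv_mod a m ∧ inv_mod a m < m ∧ m ∣ a * inv_mod a m - 1 := by
  unfold inv_mod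
  refine invModLoop_spec m.natAbs m a (PySem.Int.mod a m) m 1 0 (le_refl _) hm
    (PySem.Int.mod_nonneg a hm) (le_of_lt hm) ?_ ⟨-1, by ring⟩ ?_
  · have hmd := mod_sub_dvd a m
    have heq : 1 * a - PySem.Int.mod a m = a - PySem.Int.mod a m := by ring
    rw [heq]; exact hmd
  · obtain ⟨c, hc⟩ := mod_sub_dvd a m
    have heq : PySem.Int.mod a m = a + (-c) * m := by linarith [hc]
    rw [Int.gcd_comm, heq, Int.gcd_add_mul_right_right, Int.gcd_comm]
    exact hg

-- one B step computes exactly A's next Farey term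
theorem stepB_eq {n x1 y1 x2 y2 : Int} (h : FInv n x1 y1 x2 y2) :
    (PySem.Int.floordiv
        (x2 * (n - PySem.Int.mod (n - PySem.Int.mod (-(inv_mod x2 y2)) y2) y2) + 1) y2,
      n - PySem.Int.mod (n - PySem.Int.mod (-(inv_mod x2 y2)) y2) y2) =
    (PySem.Int.floordiv (n + y1) y2 * x2 - x1, PySem.Int.floordiv (n + y1) y2 * y2 - y1) := by
  have hg := finv_coprime h
  obtain ⟨hdet, hy2, hy2n, hy1l, hy1u, hx1, hx2⟩ := h
  have hy2pos : (0:Int) < y2 := by omega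
  obtain ⟨hi0, hi1, hidvd⟩ := inv_mod_spec hy2pos hg
  set i := inv_mod x2 y2 with hi
  set t := PySem.Int.mod (-i) y2 with ht
  have htcong : y2 ∣ -i - t := mod_sub_dvd (-i) y2
  set qn := n - PySem.Int.mod (n - t) y2 with hqn
  have hq0 := PySem.Int.mod_nonneg (n - t) hy2pos
  have hq1 := PySem.Int.mod_lt (n - t) hy2pos
  have hqt : y2 ∣ qn - t := by
    have heq : qn - t = (n - t) - PySem.Int.mod (n - t) y2 := by rw [hqn]; ring
    rw [heq]; exact mod_sub_dvd (n - t) y2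
  set m := PySem.Int.floordiv (n + y1) y2 with hm
  have hmod := PySem.Int.floordiv_mul_add_mod (n + y1) y2
  rw [← hm] at hmod
  have hr0 := PySem.Int.mod_nonneg (n + y1) hy2pos
  have hr1 := PySem.Int.mod_lt (n + y1) hy2pos
  set y3 := m * y2 - y1 with hy3
  set x3 := m * x2 - x1 with hx3
  have hy3u : y3 ≤ n := by omega
  have hy3l : n - y2 < y3 := by omega
  have hdet3 : x3 * y2 - x2 * y3 = 1 := by rw [hx3, hy3]; linear_combination hdet
  have hdy3 : y2 ∣ x2 * y3 + 1 := ⟨x3, by linear_combination -hdet3⟩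
  have hdqn : y2 ∣ x2 * qn + 1 := by
    have heq : x2 * qn + 1 =
        x2 * (qn - t) + (-x2) * (-i - t) + (-(x2 * i - 1)) := by ring
    rw [heq]
    exact dvd_add (dvd_add (Dvd.dvd.mul_left hqt x2) (Dvd.dvd.mul_left htcong (-x2)))
      (dvd_neg.mpr hidvd)
  have hddiff : y2 ∣ qn - y3 := by
    have hco : IsCoprime y2 x2 := by
      rw [Int.isCoprime_iff_gcd_eq_one, Int.gcd_comm]; exact hg
    refine hco.dvd_of_dvd_mul_left ?_
    have heq : x2 * (qn - y3) = (x2 * qn + 1) - (x2 * y3 + 1) := by ring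
    rw [heq]
    exact dvd_sub hdqn hdy3
  have hqny3 : qn = y3 := by
    have := Int.eq_zero_of_abs_lt_dvd hddiff (abs_lt.mpr ⟨by omega, by omega⟩)
    omega
  rw [hqny3]
  have hx : PySem.Int.floordiv (x2 * y3 + 1) y2 = x3 := by
    have heq : x2 * y3 + 1 = x3 * y2 := by linear_combination -hdet3
    rw [heq, PySem.Int.floordiv_eq_iff_of_pos hy2pos]
    constructor
    · exact le_refl _
    · nlinarith
  rw [hx]

theorem loops_agree (n : Int) : ∀ (j : Nat) (x1 y1 x2 y2 : Int), FInv n x1 y1 x2 y2 →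
    fareyLoopB n j (x2, y2) =
      ((fareyLoopA n j (x1, y1, x2, y2)).2.2.1, (fareyLoopA n j (x1, y1, x2, y2)).2.2.2) ∧
    FInv n (fareyLoopA n j (x1, y1, x2, y2)).1 (fareyLoopA n j (x1, y1, x2, y2)).2.1
      (fareyLoopA n j (x1, y1, x2, y2)).2.2.1 (fareyLoopA n j (x1, y1, x2, y2)).2.2.2 := by
  intro j
  induction j with
  | zero => intro x1 y1 x2 y2 h; exact ⟨rfl, h⟩
  | succ j ih =>
    intro x1 y1 x2 y2 h
    have hstep := stepB_eq h
    have hinv := finv_step h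
    simp only [fareyLoopA, fareyLoopB]
    rw [hstep]
    exact ih x2 y2 _ _ hinv

theorem pygcd_eq : ∀ (N : Nat) (a b : Int), b.natAbs ≤ N → 0 ≤ a → 0 ≤ b →
    pygcd a b = Int.gcd a b := by
  intro N
  induction N with
  | zero =>
    intro a b hN ha hb
    have : b = 0 := by omega
    subst this
    rw [pygcd]
    simp [Int.natAbs_of_nonneg ha]
  | succ N ih =>
    intro a b hN ha hb
    by_cases hb0 : b = 0
    · subst hb0; rw [pygcd]; simp [Int.natAbs_of_nonneg ha]
    · have hbpos : 0 < b := by omega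
      rw [pygcd]
      simp only [dif_neg hb0]
      have h1 := PySem.Int.mod_nonneg a hbpos
      have h2 := PySem.Int.mod_lt a hbpos
      rw [ih b (PySem.Int.mod a b) (by omega) hb h1]
      have hmod := PySem.Int.floordiv_mul_add_mod a b
      have : PySem.Int.mod a b = a + (-(PySem.Int.floordiv a b)) * b := by linarith
      rw [this, Int.gcd_add_mul_right_right, Int.gcd_comm]

-- ===== VERDICT (by name: the statement is the Claim_ definition above) =====
theorem find_farey_sequence_spec : Claim_equal_find_farey_sequence := by
  intro n k _ hPre
  obtain ⟨hn, hk⟩ := hPre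
  unfold Spec_find_farey_sequence
  have hinv0 : FInv n 0 1 1 n := ⟨by ring, hn, le_refl n, by omega, hn, le_refl 0, by omega⟩
  obtain ⟨hBA, hinv⟩ := loops_agree n (k - 1).toNat 0 1 1 n hinv0
  simp only [find_farey_sequence, find_farey_sequence_alt]
  rw [hBA]
  set s := fareyLoopA n (k - 1).toNat (0, 1, 1, n) with hs
  have hy2 : 1 ≤ s.2.2.2 := hinv.2.1
  have hx2 : 0 ≤ s.2.2.1 := hinv.2.2.2.2.2.2
  have hg : pygcd s.2.2.1 s.2.2.2 = 1 := by
    rw [pygcd_eq s.2.2.2.natAbs s.2.2.1 s.2.2.2 (le_refl _) hx2 (by omega),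
      finv_coprime hinv]
    rfl
  rw [hg]
  have hdiv : ∀ x : Int, PySem.Int.floordiv x 1 = x := by
    intro x
    rw [PySem.Int.floordiv_eq_iff_of_pos (by omega : (0:Int) < 1)]
    omega
  rw [hdiv, hdiv]
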